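-- pv_equiv track=rewrite | github.com/zrjarrell/FeatureScope | searchForExtractions.py | splitPathsByMethod
-- ===== SOURCE A (Python) =====
-- def splitPathsByMethod(pathList):
--     posList = []
--     negList = []
--     unkList = []
--     for filePath in pathList:
--         path = filePath.lower()
--         if "c18neg" in path:
--             negList += [filePath]
--         elif "hilicpos" in path or "c18pos" in path or "aepos" in path or "hilic" in path or "c18" in path or "ae" in path:
--             posList += [filePath]
--         elif "neg" in path:
--             negList += [filePath]
--         elif "pos" in path:
--             posList += [filePath]
--         else:
--             unkList += [filePath]
--     return {"pos": posList, "neg": negList, "unassigned": unkList}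
-- ===== SOURCE B (Python) =====
-- RULES = [("c18neg", "neg"), ("hilic", "pos"), ("c18", "pos"), ("ae", "pos"),
--          ("neg", "neg"), ("pos", "pos")]
--
--
-- def classify(path):
--     lowered = path.lower()
--     for token, label in RULES:
--         if token in lowered:
--             return label
--     return "unassigned"
--
--
-- def splitPathsByMethod(pathList):
--     return {label: [p for p in pathList if classify(p) == label]
--             for label in ("pos", "neg", "unassigned")}
-- ===== Notes on version B (the rewrite author's own statement) =====
-- stated objective: idiomatic
-- what changed: Replaces the single-pass if/elif cascade with three labelled accumulators by a data-driven first-match rule table (redundant hilicpos/c18pos/aepos tests dropped since they are subsumed by hilic/c18/ae) and builds the result dict by filtering the input per label.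
import Mathlib
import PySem

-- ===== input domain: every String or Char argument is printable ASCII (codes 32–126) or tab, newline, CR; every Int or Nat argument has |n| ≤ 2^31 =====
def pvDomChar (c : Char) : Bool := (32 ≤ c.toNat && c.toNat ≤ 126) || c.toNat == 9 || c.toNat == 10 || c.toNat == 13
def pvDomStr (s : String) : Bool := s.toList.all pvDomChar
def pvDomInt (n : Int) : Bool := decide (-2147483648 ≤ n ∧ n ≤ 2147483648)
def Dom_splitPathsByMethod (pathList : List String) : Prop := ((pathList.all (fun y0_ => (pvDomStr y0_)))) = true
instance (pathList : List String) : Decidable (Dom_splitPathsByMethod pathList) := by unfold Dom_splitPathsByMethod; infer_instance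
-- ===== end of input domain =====

-- B replaces A's if/elif cascade by a first-match rule table + per-label filters (idiomatic; same cost).


-- ===== PORT A =====
def pvStepA (st : List String × List String × List String) (filePath : String) :
    List String × List String × List String :=
  let path := PySem.Str.lower filePath
  if PySem.Str.isIn "c18neg" path then (st.1, st.2.1 ++ [filePath], st.2.2)
  else if PySem.Str.isIn "hilicpos" path || PySem.Str.isIn "c18pos" path ||
      PySem.Str.isIn "aepos" path || PySem.Str.isIn "hilic" path ||
      PySem.Str.isIn "c18" path || PySem.Str.isIn "ae" path then
    (st.1 ++ [filePath], st.2.1, st.2.2)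
  else if PySem.Str.isIn "neg" path then (st.1, st.2.1 ++ [filePath], st.2.2)
  else if PySem.Str.isIn "pos" path then (st.1 ++ [filePath], st.2.1, st.2.2)
  else (st.1, st.2.1, st.2.2 ++ [filePath])

def splitPathsByMethod (pathList : List String) : List (String × List String) :=
  let st := pathList.foldl pvStepA ([], [], [])
  [("pos", st.1), ("neg", st.2.1), ("unassigned", st.2.2)]

-- ===== PORT B =====
def pvRules : List (String × String) :=
  [("c18neg", "neg"), ("hilic", "pos"), ("c18", "pos"), ("ae", "pos"),
   ("neg", "neg"), ("pos", "pos")]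

def pvFirstLabel (lowered : String) : List (String × String) → String
  | [] => "unassigned"
  | (tok, label) :: rest =>
    if PySem.Str.isIn tok lowered then label else pvFirstLabel lowered rest

def pvClassify (path : String) : String :=
  pvFirstLabel (PySem.Str.lower path) pvRules

def splitPathsByMethod_alt (pathList : List String) : List (String × List String) :=
  ["pos", "neg", "unassigned"].map
    (fun label => (label, pathList.filter (fun p => pvClassify p == label)))

-- ===== PRECONDITION & SPEC =====
def Spec_splitPathsByMethod (pathList : List String) (out : List (String × List String)) : Prop := out = splitPathsByMethod_alt pathList
instance (pathList : List String) (out : List (String × List String)) : Decidable (Spec_splitPathsByMethod pathList out) := by unfold Spec_splitPathsByMethod; infer_instance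

-- ===== CLAIM (what is proved, stated in full; the proofs are below) =====
def Claim_equal_splitPathsByMethod : Prop := ∀ (pathList : List String), Dom_splitPathsByMethod pathList → Spec_splitPathsByMethod pathList (splitPathsByMethod pathList)

-- ===== LEMMAS AND PROOFS =====

-- a shorter substring's presence follows from a longer one containing it
lemma isIn_of_isIn_of_infix {a b : List Char} (l : List Char)
    (h : a <:+: b) (hb : PySem.Chars.isIn b l = true) :
    PySem.Chars.isIn a l = true := by
  rw [PySem.Chars.isIn_iff_infix] at hb ⊢
  exact h.trans hb

lemma stepA_classify (st : List String × List String × List String) (p : String) :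
    pvStepA st p =
      ((if pvClassify p = "pos" then st.1 ++ [p] else st.1),
       (if pvClassify p = "neg" then st.2.1 ++ [p] else st.2.1),
       (if pvClassify p = "unassigned" then st.2.2 ++ [p] else st.2.2)) := by
  unfold pvStepA pvClassify pvRules pvFirstLabel
  simp only [PySem.Str.isIn_eq]
  by_cases h0 : PySem.Chars.isIn ['c', '1', '8', 'n', 'e', 'g'] (PySem.Chars.lower p.toList) = true
  · simp [pvFirstLabel, h0]
  · by_cases h1 : PySem.Chars.isIn ['h', 'i', 'l', 'i', 'c'] (PySem.Chars.lower p.toList) = true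
    · simp [pvFirstLabel, h0, h1]
    · by_cases h2 : PySem.Chars.isIn ['c', '1', '8'] (PySem.Chars.lower p.toList) = true
      · simp [pvFirstLabel, h0, h1, h2]
      · by_cases h3 : PySem.Chars.isIn ['a', 'e'] (PySem.Chars.lower p.toList) = true
        · simp [pvFirstLabel, h0, h1, h2, h3]
        · have hh : ¬ PySem.Chars.isIn ['h', 'i', 'l', 'i', 'c', 'p', 'o', 's'] (PySem.Chars.lower p.toList) = true :=
            fun hc => h1 (isIn_of_isIn_of_infix _ (by decide) hc)
          have hcp : ¬ PySem.Chars.isIn ['c', '1', '8', 'p', 'o', 's'] (PySem.Chars.lower p.toList) = true :=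
            fun hc => h2 (isIn_of_isIn_of_infix _ (by decide) hc)
          have hap : ¬ PySem.Chars.isIn ['a', 'e', 'p', 'o', 's'] (PySem.Chars.lower p.toList) = true :=
            fun hc => h3 (isIn_of_isIn_of_infix _ (by decide) hc)
          by_cases h4 : PySem.Chars.isIn ['n', 'e', 'g'] (PySem.Chars.lower p.toList) = true
          · simp [pvFirstLabel, h0, h1, h2, h3, hh, hcp, hap, h4]
          · by_cases h5 : PySem.Chars.isIn ['p', 'o', 's'] (PySem.Chars.lower p.toList) = true
            · simp [pvFirstLabel, h0, h1, h2, h3, hh, hcp, hap, h4, h5]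
            · simp [pvFirstLabel, h0, h1, h2, h3, hh, hcp, hap, h4, h5]

lemma foldA_filter (l : List String) (st : List String × List String × List String) :
    l.foldl pvStepA st =
      (st.1 ++ l.filter (fun p => pvClassify p == "pos"),
       st.2.1 ++ l.filter (fun p => pvClassify p == "neg"),
       st.2.2 ++ l.filter (fun p => pvClassify p == "unassigned")) := by
  induction l generalizing st with
  | nil => simp
  | cons p rest ih =>
    simp only [List.foldl_cons, ih, stepA_classify, List.filter_cons]
    by_cases hp : pvClassify p = "pos" <;>
      by_cases hn : pvClassify p = "neg" <;>
        by_cases hu : pvClassify p = "unassigned" <;>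
          simp_all

-- ===== VERDICT (by name: the statement is the Claim_ definition above) =====
theorem splitPathsByMethod_spec : Claim_equal_splitPathsByMethod := by
  intro pathList _
  unfold Spec_splitPathsByMethod splitPathsByMethod splitPathsByMethod_alt
  simp [foldA_filter]
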